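-- pv_equiv track=rewrite | github.com/Sudhanshu9999/pitwall-pro | backend/services/openf1_service.py | _latest_pit_lap_per_driver
-- ===== SOURCE A (Python) =====
-- def _latest_pit_lap_per_driver(pits: list[dict]) -> dict[int, int]:
--     """Returns the most recent pit stop lap number per driver."""
--     latest_pit: dict[int, int] = {}
--     for p in pits:
--         drv = p["driver_number"]
--         lap = p.get("lap_number", 0)
--         if drv not in latest_pit or lap > latest_pit[drv]:
--             latest_pit[drv] = int(lap)
--     return latest_pit
-- ===== SOURCE B (Python) =====
-- def _latest_pit_lap_per_driver(pits: list[dict]) -> dict[int, int]: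
--     """Returns the most recent pit stop lap number per driver."""
--     groups: dict[int, list] = {}
--     for p in pits:
--         groups.setdefault(p["driver_number"], []).append(p.get("lap_number", 0))
--     return {drv: int(max(laps)) for drv, laps in groups.items()}
-- ===== Notes on version B (the rewrite author's own statement) =====
-- stated objective: alternative
-- what changed: Replaces A's single-pass running-max dict by a two-phase accumulate-then-reduce decomposition: one pass groups every lap into a per-driver list, a second pass maps max over each group.
import Mathlib
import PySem

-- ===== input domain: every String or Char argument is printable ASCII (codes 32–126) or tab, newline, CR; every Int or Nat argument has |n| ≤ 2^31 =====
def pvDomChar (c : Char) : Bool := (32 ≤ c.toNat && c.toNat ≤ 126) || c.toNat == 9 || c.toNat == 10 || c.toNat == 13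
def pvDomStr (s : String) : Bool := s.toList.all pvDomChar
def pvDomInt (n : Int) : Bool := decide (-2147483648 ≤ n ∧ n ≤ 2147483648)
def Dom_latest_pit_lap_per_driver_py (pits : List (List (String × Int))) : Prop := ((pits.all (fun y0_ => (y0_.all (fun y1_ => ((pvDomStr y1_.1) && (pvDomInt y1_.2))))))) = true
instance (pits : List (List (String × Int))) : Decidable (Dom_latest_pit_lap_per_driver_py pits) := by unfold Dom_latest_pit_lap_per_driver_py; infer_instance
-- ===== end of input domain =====

-- B replaces A's running-max dict by a group-laps-per-driver pass followed by a max-per-group pass (alternative decomposition; same cost).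


-- ===== PORT A =====
-- one step of A's loop body; the `none` branch is Python's KeyError (excluded by Pre_)
def pvAStep (d : PySem.Dict Int Int) (p : List (String × Int)) : PySem.Dict Int Int :=
  match (PySem.Dict.mk p).get? "driver_number" with
  | none => d
  | some drv =>
    let lap := (PySem.Dict.mk p).getD "lap_number" 0
    if ¬ d.contains drv ∨ d.getD drv 0 < lap then d.insert drv lap else d

def latest_pit_lap_per_driver_py (pits : List (List (String × Int))) : List (Int × Int) :=
  (pits.foldl pvAStep PySem.Dict.empty).items

-- ===== PORT B =====
-- Python's max over a nonempty int list (first-extremal; ties are equal on Int)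
def pyMaxInt (xs : List Int) : Int :=
  match xs with
  | [] => 0
  | x :: t => t.foldl (fun a b => if a < b then b else a) x

-- one step of B's grouping loop; the `none` branch is Python's KeyError (excluded by Pre_)
def pvBStep (g : PySem.Dict Int (List Int)) (p : List (String × Int)) : PySem.Dict Int (List Int) :=
  match (PySem.Dict.mk p).get? "driver_number" with
  | none => g
  | some drv => g.modify drv [] (· ++ [(PySem.Dict.mk p).getD "lap_number" 0])

def latest_pit_lap_per_driver_py_alt (pits : List (List (String × Int))) : List (Int × Int) :=
  let groups := pits.foldl pvBStep PySem.Dict.empty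
  groups.items.map (fun kv => (kv.1, pyMaxInt kv.2))

-- ===== PRECONDITION & SPEC =====
-- Pre_ excludes exactly the inputs where some pit dict lacks the key "driver_number": there Python A raises KeyError.
def Pre_latest_pit_lap_per_driver_py (pits : List (List (String × Int))) : Prop :=
  ∀ p ∈ pits, "driver_number" ∈ p.map Prod.fst
instance (pits : List (List (String × Int))) : Decidable (Pre_latest_pit_lap_per_driver_py pits) := by unfold Pre_latest_pit_lap_per_driver_py; infer_instance

def pvWitness_latest_pit_lap_per_driver_py : (List (List (String × Int))) :=
  [[("driver_number", 44), ("lap_number", 12)], [("driver_number", 44), ("lap_number", 30)], [("driver_number", 1)]]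

def Spec_latest_pit_lap_per_driver_py (pits : List (List (String × Int))) (out : List (Int × Int)) : Prop := out = latest_pit_lap_per_driver_py_alt pits
instance (pits : List (List (String × Int))) (out : List (Int × Int)) : Decidable (Spec_latest_pit_lap_per_driver_py pits out) := by unfold Spec_latest_pit_lap_per_driver_py; infer_instance

-- ===== CLAIM (what is proved, stated in full; the proofs are below) =====
def Claim_equal_latest_pit_lap_per_driver_py : Prop := ∀ (pits : List (List (String × Int))), Dom_latest_pit_lap_per_driver_py pits → Pre_latest_pit_lap_per_driver_py pits → Spec_latest_pit_lap_per_driver_py pits (latest_pit_lap_per_driver_py pits)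

-- ===== LEMMAS AND PROOFS =====

-- the abstraction from B's group state to A's running-max state
def pvF (kv : Int × List Int) : Int × Int := (kv.1, pyMaxInt kv.2)

-- the fold invariant
def pvRel (d : PySem.Dict Int Int) (g : PySem.Dict Int (List Int)) : Prop :=
  d.items = g.items.map pvF ∧ g.keys.Nodup ∧ ∀ kv ∈ g.items, kv.2 ≠ []

theorem pyMaxInt_append_singleton (ls : List Int) (b : Int) (h : ls ≠ []) :
    pyMaxInt (ls ++ [b]) = if pyMaxInt ls < b then b else pyMaxInt ls := by
  cases ls with
  | nil => exact absurd rfl h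
  | cons x t => simp [pyMaxInt, List.foldl_append]

theorem pvRel_get? (d : PySem.Dict Int Int) (g : PySem.Dict Int (List Int))
    (h : d.items = g.items.map pvF) (k : Int) :
    d.get? k = (g.get? k).map pyMaxInt := by
  obtain ⟨l⟩ := g
  obtain ⟨l'⟩ := d
  subst h
  induction l with
  | nil => rfl
  | cons kv rest ih =>
    rw [List.map_cons]
    show PySem.Dict.get? ⟨pvF kv :: rest.map pvF⟩ k = _
    rw [PySem.Dict.get?_mk_cons, PySem.Dict.get?_mk_cons]
    by_cases h : (kv.1 == k) = true
    · simp [pvF, h]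
    · simp [pvF, h, ih]

theorem pvRel_step (d : PySem.Dict Int Int) (g : PySem.Dict Int (List Int))
    (h : pvRel d g) (p : List (String × Int)) : pvRel (pvAStep d p) (pvBStep g p) := by
  obtain ⟨hitems, hnd, hne⟩ := h
  unfold pvAStep pvBStep
  cases hdrv : (PySem.Dict.mk p).get? "driver_number" with
  | none => exact ⟨hitems, hnd, hne⟩
  | some drv =>
    simp only []
    set lap := (PySem.Dict.mk p).getD "lap_number" 0 with hlap
    have hget := pvRel_get? d g hitems
    have hkeys : d.contains drv = g.contains drv := by
      rw [PySem.Dict.contains_eq_isSome_get?, PySem.Dict.contains_eq_isSome_get?, hget]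
      cases g.get? drv <;> rfl
    cases hgd : g.get? drv with
    | none =>
      -- fresh driver: both append
      have hcg : g.contains drv = false := by
        rw [PySem.Dict.contains_eq_isSome_get?, hgd]; rfl
      have hcd : d.contains drv = false := by rw [hkeys, hcg]
      have hcond : ¬ d.contains drv ∨ d.getD drv 0 < lap := by simp [hcd]
      rw [if_pos hcond]
      have hmod : g.modify drv [] (· ++ [lap]) = g.insert drv ([lap]) := by
        show g.insert drv (g.getD drv [] ++ [lap]) = _
        rw [PySem.Dict.getD_of_get?_eq_none _ _ hgd, List.nil_append]
      rw [hmod]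
      refine ⟨?_, PySem.Dict.nodup_keys_insert _ _ _ hnd, ?_⟩
      · rw [PySem.Dict.items_insert_of_not_contains _ _ hcd,
            PySem.Dict.items_insert_of_not_contains _ _ hcg]
        simp [hitems, pvF, pyMaxInt]
      · intro kv hkv
        rw [PySem.Dict.items_insert_of_not_contains _ _ hcg] at hkv
        rcases List.mem_append.1 hkv with h1 | h1
        · exact hne kv h1
        · simp at h1; subst h1; simp
    | some ls =>
      -- known driver
      have hcg : g.contains drv = true := by
        rw [PySem.Dict.contains_eq_isSome_get?, hgd]; rfl
      have hcd : d.contains drv = true := by rw [hkeys, hcg]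
      have hlsne : ls ≠ [] :=
        hne (drv, ls) (PySem.Dict.mem_items_of_get?_eq_some g hgd)
      have hdD : d.getD drv 0 = pyMaxInt ls := by
        rw [PySem.Dict.getD_eq_get?_getD, hget, hgd]; rfl
      have hmod : g.modify drv [] (· ++ [lap]) = g.insert drv (ls ++ [lap]) := by
        show g.insert drv (g.getD drv [] ++ [lap]) = _
        rw [PySem.Dict.getD_of_get?_eq_some _ _ hgd]
      rw [hmod]
      have hitemsG := PySem.Dict.items_insert_of_contains g (ls ++ [lap]) hcg
      have hvalmem : ∀ kv ∈ g.items, kv.1 = drv → kv.2 = ls := by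
        intro kv hkv hk
        have h1 : g.getD kv.1 [] = kv.2 :=
          PySem.Dict.getD_of_mem_items g (by exact hkv) hnd []
        rw [hk, PySem.Dict.getD_of_get?_eq_some _ _ hgd] at h1
        exact h1.symm
      have hnd' : (g.insert drv (ls ++ [lap])).keys.Nodup :=
        PySem.Dict.nodup_keys_insert _ _ _ hnd
      have hne' : ∀ kv ∈ (g.insert drv (ls ++ [lap])).items, kv.2 ≠ [] := by
        intro kv hkv
        rw [hitemsG] at hkv
        obtain ⟨kv0, hkv0, hrepl⟩ := List.mem_map.1 hkv
        by_cases hk : (kv0.1 == drv) = true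
        · rw [if_pos hk] at hrepl; subst hrepl; simp
        · rw [if_neg hk] at hrepl; subst hrepl; exact hne kv0 hkv0
      by_cases hc : pyMaxInt ls < lap
      · have hcond : ¬ d.contains drv = true ∨ d.getD drv 0 < lap := Or.inr (hdD ▸ hc)
        rw [if_pos hcond]
        refine ⟨?_, hnd', hne'⟩
        rw [PySem.Dict.items_insert_of_contains d lap hcd, hitemsG, hitems,
            List.map_map, List.map_map]
        refine List.map_congr_left ?_
        intro kv hkv
        by_cases hk : kv.1 = drv
        · have hv := hvalmem kv hkv hk
          simp [pvF, Function.comp, hk, hv, pyMaxInt_append_singleton ls lap hlsne, hc]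
        · simp [pvF, Function.comp, hk]
      · have hcond : ¬ (¬ d.contains drv = true ∨ d.getD drv 0 < lap) := by
          rw [hdD]; simp [hcd, hc]
        rw [if_neg hcond]
        refine ⟨?_, hnd', hne'⟩
        rw [hitemsG, hitems, List.map_map]
        refine (List.map_congr_left ?_).symm
        intro kv hkv
        by_cases hk : kv.1 = drv
        · have hv := hvalmem kv hkv hk
          have : pyMaxInt (ls ++ [lap]) = pyMaxInt ls := by
            rw [pyMaxInt_append_singleton ls lap hlsne, if_neg hc]
          simp [pvF, Function.comp, hk, hv, this]
        · simp [pvF, Function.comp, hk]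
  
theorem pvRel_foldl (pits : List (List (String × Int))) :
    ∀ d g, pvRel d g → pvRel (pits.foldl pvAStep d) (pits.foldl pvBStep g) := by
  induction pits with
  | nil => intro d g h; exact h
  | cons p rest ih =>
    intro d g h
    exact ih _ _ (pvRel_step d g h p)

-- ===== VERDICT (by name: the statement is the Claim_ definition above) =====
theorem latest_pit_lap_per_driver_py_spec : Claim_equal_latest_pit_lap_per_driver_py := by
  intro pits _ _
  unfold Spec_latest_pit_lap_per_driver_py latest_pit_lap_per_driver_py latest_pit_lap_per_driver_py_alt
  have h := pvRel_foldl pits PySem.Dict.empty PySem.Dict.empty ⟨rfl, List.nodup_nil, by intro kv h; cases h⟩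
  exact h.1
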